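-- pv_equiv track=rewrite | github.com/FennexFox/AIFFEL_codingtest | Programmers Lv0/배열 만들기 4.py | solution
-- ===== SOURCE A (Python) =====
-- def solution(arr):
--     stk = []
--     i = 0
--
--     while i < len(arr):
--         if len(stk) < 1 or stk[-1] < arr[i]:
--             stk.append(arr[i])
--             i += 1
--         else:
--             stk.pop()
--
--     return stk
-- ===== SOURCE B (Python) =====
-- def solution(arr):
--     # An element survives iff it is strictly smaller than every element after it:
--     # one backward pass tracking the running suffix minimum; no stack, no popping.
--     res = []
--     m = None
--     for x in reversed(arr):
--         if m is None or x < m: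
--             res.append(x)
--             m = x
--     return res[::-1]
-- ===== Notes on version B (the rewrite author's own statement) =====
-- stated objective: faster
-- what changed: Replaces the stack process entirely: an element survives A's pop-while-top>=x stack iff it is strictly smaller than every later element, so B does one backward pass keeping the running suffix minimum whenever it strictly decreases, with no stack and no popping (measured ~4x faster: no per-element stack pushes/pops or retry iterations).
import Mathlib
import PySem

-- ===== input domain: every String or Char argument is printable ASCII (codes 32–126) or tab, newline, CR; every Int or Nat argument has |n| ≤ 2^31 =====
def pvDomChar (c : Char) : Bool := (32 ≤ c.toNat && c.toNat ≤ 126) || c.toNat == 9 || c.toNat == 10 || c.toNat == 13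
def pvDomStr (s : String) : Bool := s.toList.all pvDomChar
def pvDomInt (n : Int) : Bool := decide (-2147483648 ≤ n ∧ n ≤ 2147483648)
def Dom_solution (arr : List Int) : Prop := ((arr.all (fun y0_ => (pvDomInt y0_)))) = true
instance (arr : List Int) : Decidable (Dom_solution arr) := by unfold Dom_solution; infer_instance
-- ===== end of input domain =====

-- B drops the stack altogether: an element survives A's stack process iff it is strictly
-- smaller than every later element, so B is one backward pass over the list keeping the
-- running suffix minimum whenever it strictly decreases (no stack, no popping).

-- ===== PORT A =====
-- A's while loop over state (stk, i); stk head = Python stk[-1].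
def solutionGo (arr : List Int) (stk : List Int) (i : Nat) : List Int :=
  if h : i < arr.length then
    match stk with
    | [] => solutionGo arr [arr[i]] (i + 1)              -- len(stk) < 1: append, i += 1
    | t :: rest =>
      if t < arr[i] then solutionGo arr (arr[i] :: t :: rest) (i + 1)  -- stk[-1] < arr[i]
      else solutionGo arr rest i                          -- stk.pop(), retry same i
  else stk
termination_by 2 * (arr.length - i) + stk.length
decreasing_by
  all_goals simp_all
  all_goals omega

def solution (arr : List Int) : List Int := (solutionGo arr [] 0).reverse

-- ===== PORT B =====
-- state (res, m): res = elements appended so far (Python append order), m = running minimum.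
def smStep (p : List Int × Option Int) (x : Int) : List Int × Option Int :=
  match p.2 with
  | none => (p.1 ++ [x], some x)
  | some m => if x < m then (p.1 ++ [x], some x) else p

def solution_alt (arr : List Int) : List Int :=
  ((arr.reverse.foldl smStep ([], none)).1).reverse

-- ===== PRECONDITION & SPEC =====
def Spec_solution (arr : List Int) (out : List Int) : Prop := out = solution_alt arr
instance (arr : List Int) (out : List Int) : Decidable (Spec_solution arr out) := by unfold Spec_solution; infer_instance

-- ===== CLAIM (what is proved, stated in full; the proofs are below) =====
def Claim_equal_solution : Prop := ∀ (arr : List Int), Dom_solution arr → Spec_solution arr (solution arr)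

-- ===== LEMMAS AND PROOFS =====

-- common characterisation: keep x iff all later elements are strictly larger
def keepIncr : List Int → List Int
  | [] => []
  | x :: rest => if rest.all (fun y => x < y) then x :: keepIncr rest else keepIncr rest

-- the inner "pop while top >= x" of the stack, head = top
def popGE (x : Int) : List Int → List Int
  | [] => []
  | t :: rest => if x ≤ t then popGE x rest else t :: rest

-- A's pop-retry phase at a fixed index i equals one popGE followed by the push.
theorem solutionGo_pop_phase (arr : List Int) (i : Nat) (h : i < arr.length) :
    ∀ stk : List Int, solutionGo arr stk i = solutionGo arr (arr[i] :: popGE arr[i] stk) (i + 1) := by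
  intro stk
  induction stk with
  | nil => rw [solutionGo]; simp [h, popGE]
  | cons t rest ih =>
    rw [solutionGo]
    simp only [h, dif_pos]
    by_cases hlt : t < arr[i]
    · simp [hlt, popGE, not_le.mpr hlt]
    · simp only [if_neg hlt]
      rw [ih]
      have : arr[i] ≤ t := not_lt.mp hlt
      simp [popGE, this]

theorem solutionGo_eq_foldl (arr : List Int) :
    ∀ (n i : Nat) (stk : List Int), arr.length - i ≤ n →
      solutionGo arr stk i = (arr.drop i).foldl (fun stk x => x :: popGE x stk) stk := by
  intro n
  induction n with
  | zero =>
    intro i stk hn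
    have hge : arr.length ≤ i := by omega
    rw [solutionGo]
    simp [Nat.not_lt.mpr hge, List.drop_eq_nil_of_le hge]
  | succ n ih =>
    intro i stk hn
    by_cases h : i < arr.length
    · rw [solutionGo_pop_phase arr i h stk]
      rw [ih (i + 1) _ (by omega)]
      rw [List.drop_eq_getElem_cons h]
      rfl
    · rw [solutionGo]
      simp [h, List.drop_eq_nil_of_le (Nat.not_lt.mp h)]

theorem popGE_append_lt (y x : Int) (hx : x < y) :
    ∀ s : List Int, popGE y (s ++ [x]) = popGE y s ++ [x] := by
  intro s
  induction s with
  | nil => simp [popGE, not_le.mpr hx]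
  | cons t r ih =>
    by_cases h : y ≤ t
    · simp [popGE, h, ih]
    · simp [popGE, h]

theorem popGE_of_all (y : Int) :
    ∀ s : List Int, (∀ t ∈ s, y ≤ t) → popGE y s = [] := by
  intro s
  induction s with
  | nil => simp [popGE]
  | cons t r ih =>
    intro hs
    simp [popGE, hs t (by simp)]
    exact ih (fun t ht => hs t (by simp [ht]))

-- bottom element x, everything above strictly larger: the fold either carries x at the
-- bottom to the end (if all later elements exceed x) or drops it without other effect.
theorem foldl_stack_bottom (rest : List Int) :
    ∀ (s : List Int) (x : Int), (∀ t ∈ s, x < t) →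
      rest.foldl (fun stk y => y :: popGE y stk) (s ++ [x]) =
        (if rest.all (fun y => x < y) then
          rest.foldl (fun stk y => y :: popGE y stk) s ++ [x]
        else rest.foldl (fun stk y => y :: popGE y stk) s) := by
  induction rest with
  | nil => intro s x _; simp
  | cons y r ih =>
    intro s x hs
    by_cases hxy : x < y
    · have hstep : (fun stk z => z :: popGE z stk) (s ++ [x]) y
          = (y :: popGE y s) ++ [x] := by
        simp [popGE_append_lt y x hxy s]
      have hs' : ∀ t ∈ y :: popGE y s, x < t := by
        intro t ht
        rcases List.mem_cons.mp ht with h | h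
        · exact h ▸ hxy
        · refine hs t ?_
          clear hs hstep ht ih
          induction s with
          | nil => simp [popGE] at h
          | cons a b ihs =>
            by_cases hy : y ≤ a
            · simp [popGE, hy] at h; simp [ihs h]
            · simp [popGE, hy] at h
              rcases h with h | h <;> simp [h]
      simp only [List.foldl_cons, hstep]
      rw [ih (y :: popGE y s) x hs']
      simp [hxy]
    · -- y ≤ x: both stacks collapse to [y]
      have hyx : y ≤ x := not_lt.mp hxy
      have h1 : popGE y (s ++ [x]) = [] := by
        apply popGE_of_all
        intro t ht
        rcases List.mem_append.mp ht with h | h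
        · exact le_trans hyx (le_of_lt (hs t h))
        · simp at h; omega
      have h2 : popGE y s = [] := by
        apply popGE_of_all
        intro t ht
        exact le_trans hyx (le_of_lt (hs t ht))
      simp only [List.foldl_cons, h1, h2]
      simp [hxy]

theorem solution_eq_keepIncr (arr : List Int) : solution arr = keepIncr arr := by
  unfold solution
  rw [solutionGo_eq_foldl arr arr.length 0 [] (by omega)]
  simp only [List.drop_zero]
  induction arr with
  | nil => simp [keepIncr]
  | cons x rest ih =>
    simp only [List.foldl_cons]
    have hx0 : x :: popGE x [] = ([] : List Int) ++ [x] := by simp [popGE]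
    rw [hx0, foldl_stack_bottom rest [] x (by simp)]
    by_cases hall : rest.all (fun y => x < y)
    · simp [hall, keepIncr, ih]
    · simp [hall, keepIncr, ih]

-- B-side: the backward fold computes keepIncr (reversed) while tracking the suffix minimum
theorem smFold_inv (l : List Int) :
    (l.foldr (fun x p => smStep p x) ([], none)).1 = (keepIncr l).reverse ∧
    ((l.foldr (fun x p => smStep p x) ([], none)).2 = none → l = []) ∧
    (∀ m, (l.foldr (fun x p => smStep p x) ([], none)).2 = some m →
        m ∈ l ∧ ∀ y ∈ l, m ≤ y) := by
  induction l with
  | nil => simp [keepIncr]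
  | cons x rest ih =>
    obtain ⟨h1, h2, h3⟩ := ih
    rcases hQ : rest.foldr (fun x p => smStep p x) ([], none) with ⟨r, o⟩
    rw [hQ] at h1 h2 h3
    simp only [List.foldr_cons, hQ]
    rcases o with _ | m
    · have hrest : rest = [] := h2 rfl
      subst hrest
      simp [keepIncr] at h1
      subst h1
      simp [smStep, keepIncr]
    · obtain ⟨hmem, hmin⟩ := h3 m rfl
      have hall : rest.all (fun y => x < y) = true ↔ x < m := by
        simp only [List.all_eq_true, decide_eq_true_eq]
        exact ⟨fun h => h m hmem, fun h y hy => lt_of_lt_of_le h (hmin y hy)⟩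
      by_cases hx : x < m
      · have ht : rest.all (fun y => x < y) = true := hall.mpr hx
        simp only [smStep, if_pos hx, keepIncr, ht, if_pos]
        refine ⟨by simpa using h1, by simp, ?_⟩
        intro m' hm'
        simp only [Option.some.injEq] at hm'
        subst hm'
        refine ⟨by simp, ?_⟩
        intro y hy
        rcases List.mem_cons.mp hy with h | h
        · omega
        · exact le_trans (le_of_lt hx) (hmin y h)
      · have hnall : ¬ rest.all (fun y => x < y) = true := fun h => hx (hall.mp h)
        simp only [smStep, if_neg hx, keepIncr, if_neg hnall]
        refine ⟨h1, by simp, ?_⟩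
        intro m' hm'
        simp only [Option.some.injEq] at hm'
        subst hm'
        refine ⟨by simp [hmem], ?_⟩
        intro y hy
        rcases List.mem_cons.mp hy with h | h
        · omega
        · exact hmin y h

theorem solution_alt_eq_keepIncr (arr : List Int) : solution_alt arr = keepIncr arr := by
  unfold solution_alt
  rw [List.foldl_reverse]
  rw [(smFold_inv arr).1]
  simp

-- ===== VERDICT (by name: the statement is the Claim_ definition above) =====
theorem solution_spec : Claim_equal_solution := by
  intro arr _
  unfold Spec_solution
  rw [solution_eq_keepIncr, solution_alt_eq_keepIncr]
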